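-- pv_equiv track=rewrite | github.com/RupertJoo/Ssafy_Algorithm_Study | HongchanJoo/swea17014.py | bfs
-- ===== SOURCE A (Python) =====
-- from collections import deque
--
-- def bfs(n, m):
--     visited = [-1] * 1_000_001
--     visited[n] = 0
--     q = deque()
--     q.append(n)
--     while q:
--         n_now = q.popleft()
--         if n_now == m:
--             return visited[n_now]
--         for n_nxt in (n_now + 1, n_now - 1, n_now * 2, n_now - 10):
--             if 0 < n_nxt <= 1_000_000 and visited[n_nxt] == -1:
--                 visited[n_nxt] = visited[n_now] + 1
--                 q.append(n_nxt)
-- ===== SOURCE B (Python) =====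
-- def bfs(n, m):
--     visited = [-1] * 1_000_001
--     visited[n] = 0
--     frontier = [n]
--     step = 0
--     while frontier:
--         nxt = []
--         for n_now in frontier:
--             if n_now == m:
--                 return step
--             for n_nxt in (n_now + 1, n_now - 1, n_now * 2, n_now - 10):
--                 if 0 < n_nxt <= 1_000_000 and visited[n_nxt] == -1:
--                     visited[n_nxt] = step + 1
--                     nxt.append(n_nxt)
--         frontier = nxt
--         step += 1
-- ===== Notes on version B (the rewrite author's own statement) =====
-- stated objective: alternative
-- what changed: Replaces the deque-based BFS that stores distances in the visited array and reads the answer back from it with a level-synchronized BFS: the current frontier is a plain list, the next frontier is built per level, and an explicit step counter (not an array read) is returned when m is popped.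
import Mathlib
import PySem

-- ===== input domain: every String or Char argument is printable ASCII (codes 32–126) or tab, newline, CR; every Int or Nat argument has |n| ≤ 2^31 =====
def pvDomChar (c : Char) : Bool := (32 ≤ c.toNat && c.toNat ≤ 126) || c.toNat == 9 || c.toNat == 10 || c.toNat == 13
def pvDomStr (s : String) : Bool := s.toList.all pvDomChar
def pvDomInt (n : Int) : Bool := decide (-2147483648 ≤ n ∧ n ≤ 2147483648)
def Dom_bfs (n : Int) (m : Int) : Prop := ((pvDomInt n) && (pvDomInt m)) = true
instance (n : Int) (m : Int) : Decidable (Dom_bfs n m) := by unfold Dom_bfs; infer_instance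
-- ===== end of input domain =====

-- B restructures A's deque BFS (answer read back from the dist array) into a
-- level-synchronized frontier BFS returning an explicit step counter (objective: alternative).

-- ===== PORT A =====
-- The Python list 'visited' of length 1_000_001 is modeled as an Array Int addressed
-- through cell; pyIdx is Python's negative-index wrap (exact for indices in
-- [-1_000_001, 1_000_000]; out-of-range indices raise in Python and are excluded by Pre_).
def pyIdx (i : Int) : Int := if i < 0 then i + 1000001 else i
def cell (i : Int) : Nat := (pyIdx i).toNat
def vget (v : Array Int) (i : Int) : Int := v.getD (cell i) (-1)
def vset (v : Array Int) (i : Int) (x : Int) : Array Int := v.setIfInBounds (cell i) x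

-- one iteration of A's inner 'for n_nxt in …' body (p is the popped n_now);
-- st is (the deque's backing array, visited)
def bfsStepA (p : Int) (st : Array Int × Array Int) (x : Int) : Array Int × Array Int :=
  if 0 < x ∧ x ≤ 1000000 ∧ vget st.2 x = -1 then
    (st.1.push x, vset st.2 x (vget st.2 p + 1))
  else st

-- A's 'while q' loop; the deque is the backing array q with read position head
-- (popleft = read q[head], advance head); fuel bounds the number of pops
-- (1_000_002 exceeds the number of appends Python can ever perform:
-- one initial + at most one per cell in 1..10^6)
def bfsLoop (m : Int) (fuel : Nat) (q : Array Int) (head : Nat) (v : Array Int) : Option Int :=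
  match fuel with
  | 0 => none
  | fuel + 1 =>
    if h : head < q.size then
      if q[head] = m then some (vget v q[head])
      else
        let st := [q[head] + 1, q[head] - 1, q[head] * 2, q[head] - 10].foldl (bfsStepA q[head]) (q, v)
        bfsLoop m fuel st.1 (head + 1) st.2
    else none

def bfs (n : Int) (m : Int) : Option Int :=
  bfsLoop m 1000002 #[n] 0 (vset (Array.replicate 1000001 (-1)) n 0)

-- ===== PORT B =====
-- one iteration of B's inner 'for n_nxt in …' body (marks with the level counter);
-- st is (the next frontier being built, visited)
def bfsStepB (step : Int) (st : Array Int × Array Int) (x : Int) : Array Int × Array Int :=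
  if 0 < x ∧ x ≤ 1000000 ∧ vget st.2 x = -1 then
    (st.1.push x, vset st.2 x (step + 1))
  else st

-- B's level-synchronized loop: cur is the frontier being consumed, next the one
-- being built; fuel again counts pops (the cur = [] level swap consumes none)
def bfsLevel (m : Int) (fuel : Nat) (cur : List Int) (next : Array Int) (step : Int)
    (v : Array Int) : Option Int :=
  match cur with
  | [] =>
    if next.isEmpty then none
    else bfsLevel m fuel next.toList #[] (step + 1) v
  | n_now :: cur' =>
    match fuel with
    | 0 => none
    | fuel + 1 =>
      if n_now = m then some step
      else
        let st := [n_now + 1, n_now - 1, n_now * 2, n_now - 10].foldl (bfsStepB step) (next, v)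
        bfsLevel m fuel cur' st.1 step st.2
termination_by (fuel, if cur.isEmpty then 1 else 0)
decreasing_by
  · rename_i hne
    apply Prod.Lex.right
    have h0 : next.toList.isEmpty = false := by
      rw [List.isEmpty_eq_false_iff]
      exact fun he => hne (Array.isEmpty_iff.mpr (Array.toList_eq_nil_iff.mp he))
    simp [h0]
  · exact Prod.Lex.left _ _ (Nat.lt_succ_self _)

def bfs_alt (n : Int) (m : Int) : Option Int :=
  bfsLevel m 1000002 [n] #[] 0 (vset (Array.replicate 1000001 (-1)) n 0)

-- ===== PRECONDITION & SPEC =====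
-- Pre_ excludes exactly the inputs where Python A raises IndexError: 'visited[n] = 0'
-- needs -1_000_001 ≤ n ≤ 1_000_000 (Python wraps negative indices, raises beyond).
def Pre_bfs (n : Int) (m : Int) : Prop := -1000001 ≤ n ∧ n ≤ 1000000
instance (n : Int) (m : Int) : Decidable (Pre_bfs n m) := by unfold Pre_bfs; infer_instance
def pvWitness_bfs : Int × Int := (1, 5)

def Spec_bfs (n : Int) (m : Int) (out : Option Int) : Prop := out = bfs_alt n m
instance (n : Int) (m : Int) (out : Option Int) : Decidable (Spec_bfs n m out) := by unfold Spec_bfs; infer_instance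

-- ===== CLAIM (what is proved, stated in full; the proofs are below) =====
def Claim_equal_bfs : Prop := ∀ (n : Int) (m : Int), Dom_bfs n m → Pre_bfs n m → Spec_bfs n m (bfs n m)

-- ===== LEMMAS AND PROOFS =====

theorem vget_congr (v : Array Int) {i j : Int} (h : cell j = cell i) : vget v j = vget v i := by
  unfold vget; rw [h]

theorem size_vset (v : Array Int) (i x : Int) : (vset v i x).size = v.size :=
  Array.size_setIfInBounds

theorem vget_vset_self (v : Array Int) (i x : Int) (hin : cell i < v.size) :
    vget (vset v i x) i = x := by
  unfold vget vset
  rw [Array.getD_eq_getD_getElem?, Array.getElem?_setIfInBounds]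
  simp [hin]

theorem vget_vset_ne (v : Array Int) (i j x : Int) (h : cell j ≠ cell i) :
    vget (vset v i x) j = vget v j := by
  unfold vget vset
  rw [Array.getD_eq_getD_getElem?, Array.getElem?_setIfInBounds,
    if_neg (fun he => h he.symm), ← Array.getD_eq_getD_getElem?]

theorem foldB_size (step : Int) (xs : List Int) :
    ∀ (b v : Array Int), ((xs.foldl (bfsStepB step) (b, v)).2).size = v.size := by
  induction xs with
  | nil => intro b v; rfl
  | cons x xs ih =>
    intro b v
    simp only [List.foldl_cons, bfsStepB]
    by_cases hg : 0 < x ∧ x ≤ 1000000 ∧ vget v x = -1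
    · rw [if_pos hg, ih]; exact size_vset v x (step + 1)
    · rw [if_neg hg]; exact ih b v

-- marking only writes cells whose value is -1, so any cell already ≠ -1 is untouched
theorem foldB_preserve (step : Int) (xs : List Int) :
    ∀ (b v : Array Int) (j : Int), vget v j ≠ -1 →
      vget ((xs.foldl (bfsStepB step) (b, v)).2) j = vget v j := by
  induction xs with
  | nil => intro b v j _; rfl
  | cons x xs ih =>
    intro b v j h
    simp only [List.foldl_cons, bfsStepB]
    by_cases hg : 0 < x ∧ x ≤ 1000000 ∧ vget v x = -1
    · rw [if_pos hg]
      have hne : cell j ≠ cell x := by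
        intro he; exact h ((vget_congr v he).trans hg.2.2)
      rw [ih _ _ j (by rw [vget_vset_ne v x j _ hne]; exact h), vget_vset_ne v x j _ hne]
    · rw [if_neg hg]; exact ih b v j h

-- every element of the accumulated next frontier carries mark step + 1
theorem foldB_members (step : Int) (xs : List Int) :
    ∀ (b v : Array Int), v.size = 1000001 → (∀ y ∈ b.toList, vget v y = step + 1) →
      ∀ y ∈ ((xs.foldl (bfsStepB step) (b, v)).1).toList,
        vget ((xs.foldl (bfsStepB step) (b, v)).2) y = step + 1 := by
  induction xs with
  | nil => intro b v _ hb y hy; exact hb y hy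
  | cons x xs ih =>
    intro b v hsz hb y hy
    simp only [List.foldl_cons, bfsStepB] at hy ⊢
    by_cases hg : 0 < x ∧ x ≤ 1000000 ∧ vget v x = -1
    · rw [if_pos hg] at hy ⊢
      have hin : cell x < v.size := by
        have : cell x = x.toNat := by unfold cell pyIdx; rw [if_neg (by omega)]
        rw [this, hsz]; omega
      refine ih (b.push x) _ (by rw [size_vset]; exact hsz) ?_ y hy
      intro z hz
      rw [Array.toList_push] at hz
      rcases List.mem_append.mp hz with hz | hz
      · by_cases he : cell z = cell x
        · rw [vget_congr _ he, vget_vset_self v x _ hin]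
        · rw [vget_vset_ne v x z _ he]; exact hb z hz
      · simp at hz
        rw [hz, vget_vset_self v x _ hin]
    · rw [if_neg hg] at hy ⊢; exact ih b v hsz hb y hy

-- A's fold over the neighbors equals B's: same visited writes (A's value
-- vget v p + 1 is step + 1 throughout), and both append the same new elements
theorem fold_AB (p step : Int) (hstep : 0 ≤ step) (xs : List Int) :
    ∀ (q next v : Array Int), vget v p = step →
      (xs.foldl (bfsStepA p) (q, v)).2 = (xs.foldl (bfsStepB step) (next, v)).2 ∧
      ∃ app : List Int,
        ((xs.foldl (bfsStepA p) (q, v)).1).toList = q.toList ++ app ∧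
        ((xs.foldl (bfsStepB step) (next, v)).1).toList = next.toList ++ app := by
  induction xs with
  | nil => intro q next v _; exact ⟨rfl, [], by simp, by simp⟩
  | cons x xs ih =>
    intro q next v hv
    simp only [List.foldl_cons, bfsStepA, bfsStepB]
    by_cases hg : 0 < x ∧ x ≤ 1000000 ∧ vget v x = -1
    · rw [if_pos hg, if_pos hg]
      have hne : cell p ≠ cell x := by
        intro he
        rw [vget_congr v he, hg.2.2] at hv; omega
      have hv' : vget (vset v x (step + 1)) p = step := by
        rw [vget_vset_ne v x p _ hne]; exact hv
      rw [hv]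
      obtain ⟨hsnd, app, ha, hb⟩ := ih (q.push x) (next.push x) (vset v x (step + 1)) hv'
      refine ⟨hsnd, x :: app, ?_, ?_⟩
      · rw [ha, Array.toList_push, List.append_assoc]; rfl
      · rw [hb, Array.toList_push, List.append_assoc]; rfl
    · rw [if_neg hg, if_neg hg]; exact ih q next v hv

-- main simulation: A's pending deque contents (q from position head on) are always
-- cur ++ next; cur carries mark step, next carries step + 1
theorem loop_level (m : Int) (fuel : Nat) :
    ∀ (cur : List Int) (next : Array Int) (step : Int) (q : Array Int) (head : Nat)
      (v : Array Int),
      cur ≠ [] → 0 ≤ step → head ≤ q.size → q.toList.drop head = cur ++ next.toList →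
      v.size = 1000001 →
      (∀ x ∈ cur, vget v x = step) →
      (∀ x ∈ next.toList, vget v x = step + 1) →
      bfsLoop m fuel q head v = bfsLevel m fuel cur next step v := by
  induction fuel with
  | zero =>
    intro cur next step q head v hc _ _ _ _ _ _
    match cur with
    | n_now :: cur' => rw [bfsLevel]; rfl
  | succ fuel ih =>
    intro cur next step q head v hc hstep hhead hdrop hsz I1 I2
    match cur with
    | n_now :: cur' =>
      have hlt : head < q.size := by
        by_contra hge
        rw [List.drop_eq_nil_of_le (by simpa using Nat.le_of_not_lt hge)] at hdrop
        exact (List.cons_ne_nil _ _) hdrop.symm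
      have hlt' : head < q.toList.length := by simpa using hlt
      have hdrop' := List.drop_eq_getElem_cons hlt'
      rw [hdrop'] at hdrop
      have hhd : q[head] = n_now := by
        have := (List.cons.injEq _ _ _ _).mp hdrop
        rw [← this.1, Array.getElem_toList]
      have htl : q.toList.drop (head + 1) = cur' ++ next.toList :=
        ((List.cons.injEq _ _ _ _).mp hdrop).2
      rw [bfsLevel]
      simp only [bfsLoop, dif_pos hlt, hhd]
      by_cases hm : n_now = m
      · rw [if_pos hm, if_pos hm, I1 n_now (by simp)]
      · rw [if_neg hm, if_neg hm]
        obtain ⟨hsnd, app, ha, hb⟩ :=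
          fold_AB n_now step hstep [n_now + 1, n_now - 1, n_now * 2, n_now - 10]
            q next v (I1 n_now (by simp))
        set ra := [n_now + 1, n_now - 1, n_now * 2, n_now - 10].foldl (bfsStepA n_now) (q, v)
          with hra
        set rb := [n_now + 1, n_now - 1, n_now * 2, n_now - 10].foldl (bfsStepB step) (next, v)
          with hrb
        have hsz' : rb.2.size = 1000001 := by rw [foldB_size]; exact hsz
        have I1' : ∀ x ∈ cur', vget rb.2 x = step := by
          intro x hx
          rw [foldB_preserve step _ next v x (by rw [I1 x (by simp [hx])]; omega)]
          exact I1 x (by simp [hx])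
        have I2' : ∀ x ∈ rb.1.toList, vget rb.2 x = step + 1 :=
          foldB_members step _ next v hsz I2
        have hhead' : head + 1 ≤ ra.1.size := by
          have : ra.1.toList.length = q.toList.length + app.length := by rw [ha]; simp
          simp only [Array.length_toList] at this
          omega
        have hdrop'' : ra.1.toList.drop (head + 1) = cur' ++ rb.1.toList := by
          rw [ha, List.drop_append_of_le_length (by simpa using hlt), htl, hb,
            List.append_assoc]
        rw [hsnd]
        match hcur' : cur' with
        | c :: cs =>
          exact ih (c :: cs) rb.1 step ra.1 (head + 1) rb.2 (by simp) hstep hhead'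
            (by rw [hdrop'']) hsz' (fun x hx => I1' x (hcur' ▸ hx)) I2'
        | [] =>
          rw [List.nil_append] at hdrop''
          rw [bfsLevel]
          by_cases hemp : rb.1.isEmpty
          · rw [if_pos hemp]
            have : ¬ head + 1 < ra.1.size := by
              have h0 : rb.1.toList = [] :=
                Array.toList_eq_nil_iff.mpr (Array.isEmpty_iff.mp hemp)
              rw [h0] at hdrop''
              have := List.drop_eq_nil_iff.mp hdrop''
              simpa using this
            match fuel with
            | 0 => rfl
            | fuel + 1 => simp only [bfsLoop, dif_neg this]
          · rw [if_neg hemp]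
            have hne : rb.1.toList ≠ [] := fun h0 =>
              hemp (Array.isEmpty_iff.mpr (Array.toList_eq_nil_iff.mp h0))
            refine ih rb.1.toList #[] (step + 1) ra.1 (head + 1) rb.2 hne (by omega) hhead'
              (by rw [hdrop'']; simp) hsz' I2' (by intro x hx; simp at hx)

-- ===== VERDICT (by name: the statement is the Claim_ definition above) =====
theorem bfs_spec : Claim_equal_bfs := by
  intro n m _ hpre
  show bfs n m = bfs_alt n m
  unfold bfs bfs_alt
  have hin : cell n < (Array.replicate 1000001 (-1 : Int)).size := by
    unfold cell pyIdx
    rw [Array.size_replicate]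
    rcases hpre with ⟨h1, h2⟩
    split <;> omega
  exact loop_level m 1000002 [n] #[] 0 #[n] 0 _ (by simp) (by omega)
    (by simp) (by simp) (by rw [size_vset, Array.size_replicate])
    (by intro x hx; simp at hx; rw [hx]; exact vget_vset_self _ n 0 hin)
    (by intro x hx; simp at hx)
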